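-- pv_equiv track=rewrite | github.com/maxime-filippini/aoc-2023 | day1/main.py | find_all_digits
-- ===== SOURCE A (Python) =====
-- digits = "0123456789"
--
-- spelled = (
--     "zero",
--     "one",
--     "two",
--     "three",
--     "four",
--     "five",
--     "six",
--     "seven",
--     "eight",
--     "nine",
-- )
--
-- TFoundDigit = tuple[int, str]
--
-- def find_all_digits(text: str) -> tuple[list[TFoundDigit], list[TFoundDigit]]:
--     digit_idx = [
--         (x, d) for d in digits for f in (text.find, text.rfind) if (x := f(d)) > -1
--     ]
--
--     spelled_idx = [
--         (x, str(i))
--         for i, s in enumerate(spelled)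
--         for f in (text.find, text.rfind)
--         if (x := f(s)) > -1
--     ]
--     return digit_idx, spelled_idx
-- ===== SOURCE B (Python) =====
-- # B: build an occurrence index in ONE pass over the text (a dict mapping each
-- # symbol to its ordered list of match positions), then emit first/last per
-- # symbol from the index, instead of A's 20 independent find/rfind scans.
-- digits = "0123456789"
--
-- spelled = (
--     "zero",
--     "one",
--     "two",
--     "three",
--     "four",
--     "five",
--     "six",
--     "seven",
--     "eight",
--     "nine",
-- )
--
--
-- def find_all_digits(text):
--     # single left-to-right pass: record every hit event (symbol, position)
--     hits = []
--     for i, c in enumerate(text):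
--         if c in digits:
--             hits.append((c, i))
--         for w in spelled:
--             if text.startswith(w, i):
--                 hits.append((w, i))
--     # group positions by symbol (positions stay in increasing order)
--     occ = {}
--     for sym, i in hits:
--         occ.setdefault(sym, []).append(i)
--     # emit: first occurrence = head of the list, last = tail
--     digit_idx = []
--     for d in digits:
--         pos = occ.get(d, [])
--         if pos:
--             digit_idx.append((pos[0], d))
--             digit_idx.append((pos[-1], d))
--     spelled_idx = []
--     for k, w in enumerate(spelled):
--         pos = occ.get(w, [])
--         if pos:
--             spelled_idx.append((pos[0], str(k)))
--             spelled_idx.append((pos[-1], str(k)))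
--     return digit_idx, spelled_idx
-- ===== Notes on version B (the rewrite author's own statement) =====
-- stated objective: alternative
-- what changed: B makes one left-to-right pass over the text collecting all (symbol, position) hit events, groups them into a dict of ordered position lists, and emits each symbol's first/last from the head and tail of its list, replacing A's 20 independent find/rfind scans.
import Mathlib
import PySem

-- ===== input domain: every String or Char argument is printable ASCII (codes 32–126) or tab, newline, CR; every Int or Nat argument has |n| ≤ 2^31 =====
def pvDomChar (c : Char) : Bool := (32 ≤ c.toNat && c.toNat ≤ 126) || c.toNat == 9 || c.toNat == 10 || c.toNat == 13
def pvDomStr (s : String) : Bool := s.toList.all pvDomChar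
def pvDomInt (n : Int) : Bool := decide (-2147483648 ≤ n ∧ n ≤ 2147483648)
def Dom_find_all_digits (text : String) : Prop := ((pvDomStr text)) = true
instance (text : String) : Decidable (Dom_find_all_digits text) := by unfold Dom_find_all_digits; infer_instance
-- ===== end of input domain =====

-- B builds an occurrence index (symbol -> ordered hit positions) in one pass over the
-- text and emits each symbol's first/last from that table, instead of A's paired
-- find/rfind scans per symbol; objective: alternative.


-- module constants: digits = "0123456789" (iterated char by char) and the spelled tuple
def pvDigits : List Char := "0123456789".toList
def pvSpelled : List String := ["zero", "one", "two", "three", "four", "five", "six", "seven", "eight", "nine"]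

-- ===== PORT A =====
-- the two comprehensions: for each symbol, f ∈ (text.find, text.rfind), keep (x, name) when x > -1
def find_all_digits (text : String) : (List (Int × String)) × (List (Int × String)) :=
  (pvDigits.flatMap (fun d =>
    [PySem.Str.find text (String.ofList [d]), PySem.Str.rfind text (String.ofList [d])].filterMap
      (fun x => if x > -1 then some (x, String.ofList [d]) else none)),
   (PySem.List.enumerate pvSpelled 0).flatMap (fun p =>
    [PySem.Str.find text p.2, PySem.Str.rfind text p.2].filterMap
      (fun x => if x > -1 then some (x, PySem.Int.toStr p.1) else none)))

-- ===== PORT B =====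
-- Python's text.startswith(pat, i) with 0 ≤ i: exact as a prefix test on the drop at i
def pvStartsAt (s : List Char) (pat : List Char) (i : Int) : Bool :=
  PySem.Chars.startswith (s.drop i.toNat) pat

-- the single scan: every (symbol, position) hit event, in position order
-- ('c in digits' for the 1-char c = text[i] is exactly char membership)
def pvHits (text : String) : List (String × Int) :=
  (PySem.List.enumerate text.toList 0).foldl
    (fun acc p =>
      pvSpelled.foldl
        (fun a w => if pvStartsAt text.toList w.toList p.1 then a ++ [(w, p.1)] else a)
        (if p.2 ∈ pvDigits then acc ++ [(String.ofList [p.2], p.1)] else acc))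
    []

-- occ: group positions by symbol (occ.setdefault(sym, []).append(i) = modify with default [])
def pvOcc (text : String) : PySem.Dict String (List Int) :=
  (pvHits text).foldl (fun d p => d.modify p.1 [] (fun l => l ++ [p.2])) PySem.Dict.empty

def find_all_digits_alt (text : String) : (List (Int × String)) × (List (Int × String)) :=
  (pvDigits.foldl (fun acc d =>
     let pos := (pvOcc text).getD (String.ofList [d]) []
     if pos ≠ [] then
       acc ++ [(PySem.List.pyGetD pos 0 0, String.ofList [d]),
               (PySem.List.pyGetD pos (-1) 0, String.ofList [d])]
     else acc) [],
   (PySem.List.enumerate pvSpelled 0).foldl (fun acc p =>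
     let pos := (pvOcc text).getD p.2 []
     if pos ≠ [] then
       acc ++ [(PySem.List.pyGetD pos 0 0, PySem.Int.toStr p.1),
               (PySem.List.pyGetD pos (-1) 0, PySem.Int.toStr p.1)]
     else acc) [])

-- ===== PRECONDITION & SPEC =====
def Spec_find_all_digits (text : String) (out : (List (Int × String)) × (List (Int × String))) : Prop := out = find_all_digits_alt text
instance (text : String) (out : (List (Int × String)) × (List (Int × String))) : Decidable (Spec_find_all_digits text out) := by unfold Spec_find_all_digits; infer_instance

-- ===== CLAIM (what is proved, stated in full; the proofs are below) =====
def Claim_equal_find_all_digits : Prop := ∀ (text : String), Dom_find_all_digits text → Spec_find_all_digits text (find_all_digits text)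

-- ===== LEMMAS AND PROOFS =====

-- selection of the positions whose enumerated entry satisfies q
def pvSel {α : Type} (q : Int → α → Bool) (l : List (Int × α)) : List Int :=
  l.flatMap (fun p => if q p.1 p.2 then [p.1] else [])

theorem pvSel_cons {α : Type} (q : Int → α → Bool) (p : Int × α) (l : List (Int × α)) :
    pvSel q (p :: l) = (if q p.1 p.2 then [p.1] else []) ++ pvSel q l := by
  simp [pvSel]

theorem pvSel_mem {α : Type} (q : Int → α → Bool) (s : List α) (k : Int) (i : Int) :
    i ∈ pvSel q (PySem.List.enumerate s k) ↔
      ∃ t : Nat, ∃ h : t < s.length, i = k + t ∧ q (k + t) (s[t]'h) = true := by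
  induction s generalizing k with
  | nil => simp [pvSel, PySem.List.enumerate_nil]
  | cons c s ih =>
    rw [PySem.List.enumerate_cons, pvSel_cons]
    simp only [List.mem_append]
    constructor
    · rintro (h1 | h2)
      · by_cases hq : q k c = true
        · rw [if_pos hq] at h1
          simp only [List.mem_singleton] at h1
          exact ⟨0, by simp, by simpa using h1, by simpa using hq⟩
        · rw [if_neg hq] at h1; cases h1
      · obtain ⟨t, ht, hi, hq⟩ := (ih (k + 1)).1 h2
        refine ⟨t + 1, by simp only [List.length_cons]; omega, ?_, ?_⟩
        · rw [hi]; push_cast; ring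
        · have : k + 1 + (t : Int) = k + ((t : Nat) + 1 : Nat) := by push_cast; ring
          rw [this] at hq; simpa using hq
    · rintro ⟨t, ht, hi, hq⟩
      cases t with
      | zero =>
        left
        simp only [Nat.cast_zero, add_zero] at hi hq
        simp only [List.getElem_cons_zero] at hq
        rw [if_pos hq]; simp [hi]
      | succ t =>
        right
        apply (ih (k + 1)).2
        refine ⟨t, by simp only [List.length_cons] at ht; omega, ?_, ?_⟩
        · rw [hi]; push_cast; ring
        · have : k + ((t + 1 : Nat) : Int) = k + 1 + (t : Nat) := by push_cast; ring
          rw [this] at hq; simpa using hq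

theorem pvSel_pairwise {α : Type} (q : Int → α → Bool) (s : List α) (k : Int) :
    (pvSel q (PySem.List.enumerate s k)).Pairwise (· < ·) := by
  induction s generalizing k with
  | nil => simp [pvSel, PySem.List.enumerate_nil]
  | cons c s ih =>
    rw [PySem.List.enumerate_cons, pvSel_cons]
    apply List.pairwise_append.2
    refine ⟨?_, ih (k + 1), ?_⟩
    · split <;> simp
    · intro a ha b hb
      obtain ⟨t, ht, hb', _⟩ := (pvSel_mem q s (k + 1) b).1 hb
      have ha' : a = k := by
        by_cases hq : q k c = true
        · rw [if_pos hq] at ha; simpa using ha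
        · rw [if_neg hq] at ha; cases ha
      omega

-- nonempty pattern is never a prefix of the tail beyond the end of s
theorem pvNoHitPast (s pat : List Char) (h : pat ≠ []) {j : Nat} (hj : s.length ≤ j) :
    ¬ pat <+: s.drop j := by
  rw [List.drop_eq_nil_of_le hj, List.prefix_nil]
  exact h

-- rfind.go j returns the greatest hit ≤ j, or -1
theorem pvRfindGo_char (s pat : List Char) (j : Nat) :
    (PySem.Chars.rfind.go s pat j = -1 ∧ ∀ i ≤ j, pat.isPrefixOf (s.drop i) = false)
    ∨ (∃ k : Nat, k ≤ j ∧ PySem.Chars.rfind.go s pat j = (k : Int)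
        ∧ pat.isPrefixOf (s.drop k) = true ∧ ∀ i, k < i → i ≤ j → pat.isPrefixOf (s.drop i) = false) := by
  induction j with
  | zero =>
    cases hp : pat.isPrefixOf s with
    | true =>
      refine Or.inr ⟨0, le_refl 0, ?_, by simpa using hp, by omega⟩
      rw [PySem.Chars.rfind.go]; simp [hp]
    | false =>
      refine Or.inl ⟨by rw [PySem.Chars.rfind.go]; simp [hp], ?_⟩
      intro i hi
      have : i = 0 := by omega
      rw [this]; exact hp
  | succ t ih =>
    cases hp : pat.isPrefixOf (s.drop (t+1)) with
    | true =>
      refine Or.inr ⟨t+1, le_refl _, ?_, hp, by omega⟩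
      rw [PySem.Chars.rfind.go]; simp [hp]
    | false =>
      have hgo : PySem.Chars.rfind.go s pat (t+1) = PySem.Chars.rfind.go s pat t := by
        rw [PySem.Chars.rfind.go]; simp [hp]
      rcases ih with ⟨heq, hnone⟩ | ⟨k, hk, heq, hpk, hmax⟩
      · refine Or.inl ⟨hgo ▸ heq, ?_⟩
        intro i hi
        rcases Nat.lt_or_ge i (t+1) with h | h
        · exact hnone i (by omega)
        · have : i = t + 1 := by omega
          rw [this]; exact hp
      · refine Or.inr ⟨k, by omega, hgo ▸ heq, hpk, ?_⟩
        intro i h1 h2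
        rcases Nat.lt_or_ge i (t+1) with h | h
        · exact hmax i h1 (by omega)
        · have : i = t + 1 := by omega
          rw [this]; exact hp

-- a strictly increasing list is bounded by its last element
theorem pvLe_getLast (L : List Int) (hpw : L.Pairwise (· < ·)) (h : L ≠ []) :
    ∀ x ∈ L, x ≤ L.getLast h := by
  induction L with
  | nil => cases h rfl
  | cons a rest ih =>
    intro x hx
    cases rest with
    | nil => simp at hx; simp [hx]
    | cons b rest' =>
      rw [List.getLast_cons (by simp)]
      have hpw' := List.pairwise_cons.1 hpw
      rcases List.mem_cons.1 hx with rfl | hx'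
      · have hmem : (b :: rest').getLast (by simp) ∈ b :: rest' := List.getLast_mem _
        exact le_of_lt (hpw'.1 _ hmem)
      · exact ih hpw'.2 (by simp) x hx'

-- B's head/tail of the position list are exactly find/rfind
theorem pvFR (text pat : String) (hp : pat.toList ≠ []) (L : List Int)
    (hpw : L.Pairwise (· < ·))
    (hmem : ∀ i : Int, i ∈ L ↔ ∃ t : Nat, t < text.toList.length ∧ i = (t : Int)
            ∧ pat.toList <+: text.toList.drop t) :
    (L = [] ∧ PySem.Str.find text pat = -1 ∧ PySem.Str.rfind text pat = -1)
    ∨ (∃ (jf jl : Nat) (hne : L ≠ []), L.getD 0 0 = (jf : Int) ∧ L.getLast hne = (jl : Int)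
        ∧ PySem.Str.find text pat = (jf : Int) ∧ PySem.Str.rfind text pat = (jl : Int)) := by
  set s := text.toList with hs
  set p := pat.toList with hpdef
  have hfind : PySem.Str.find text pat = PySem.Chars.find s p := PySem.Str.find_eq text pat
  have hrfind : PySem.Str.rfind text pat = PySem.Chars.rfind.go s p s.length := by
    rw [PySem.Str.rfind_eq]; rfl
  cases L with
  | nil =>
    have hnohit : ∀ t : Nat, ¬ p <+: s.drop t := by
      intro t hpre
      rcases Nat.lt_or_ge t s.length with ht | ht
      · exact absurd ((hmem (t : Int)).2 ⟨t, ht, rfl, hpre⟩) (by simp)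
      · exact pvNoHitPast s p hp ht hpre
    refine Or.inl ⟨rfl, ?_, ?_⟩
    · rw [hfind, PySem.Chars.find_eq_neg_one_iff]
      intro hinf
      rcases (PySem.Chars.exists_prefix_drop_iff_isIn p s).2
        ((PySem.Chars.isIn_iff_infix p s).2 hinf) with ⟨j, hj⟩
      exact hnohit j hj
    · rw [hrfind]
      rcases pvRfindGo_char s p s.length with ⟨heq', _⟩ | ⟨k, _, _, hpk, _⟩
      · exact heq'
      · exact absurd ((List.isPrefixOf_iff_prefix ..).1 hpk) (hnohit k)
  | cons a rest =>
    obtain ⟨ta, hta, haa, hhita⟩ := (hmem a).1 (List.mem_cons_self)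
    have hgl := List.getLast_mem (l := a :: rest) (by simp)
    obtain ⟨tl, htl, hgleq, hhitl⟩ := (hmem _).1 hgl
    have hmin : ∀ x ∈ a :: rest, a ≤ x := by
      intro x hx
      rcases List.mem_cons.1 hx with rfl | hx'
      · exact le_refl x
      · exact le_of_lt ((List.pairwise_cons.1 hpw).1 x hx')
    have hmax := pvLe_getLast (a :: rest) hpw (by simp)
    refine Or.inr ⟨ta, tl, by simp, by simpa using haa, by simpa using hgleq, ?_, ?_⟩
    · -- find = ta
      have hinf : p <:+: s := (PySem.Chars.isIn_iff_infix p s).1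
        ((PySem.Chars.exists_prefix_drop_iff_isIn p s).1 ⟨ta, hhita⟩)
      have hne : PySem.Chars.find s p ≠ -1 := by
        rw [Ne, PySem.Chars.find_eq_neg_one_iff]; exact fun hc => hc hinf
      have hge : 0 ≤ PySem.Chars.find s p := by
        have := PySem.Chars.neg_one_le_find s p
        omega
      rcases PySem.Chars.find_spec hge with ⟨hat, hleast⟩
      have hlt : (PySem.Chars.find s p).toNat < s.length := by
        by_contra hc
        exact pvNoHitPast s p hp (by omega) hat
      have h1 : ((PySem.Chars.find s p).toNat : Int) ∈ a :: rest :=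
        (hmem _).2 ⟨_, hlt, rfl, hat⟩
      have h2 : a ≤ ((PySem.Chars.find s p).toNat : Int) := hmin _ h1
      have h3 : ¬ ta < (PySem.Chars.find s p).toNat := fun hc => hleast ta hc hhita
      rw [hfind]
      omega
    · -- rfind = tl
      rw [hrfind]
      rcases pvRfindGo_char s p s.length with ⟨_, hnone'⟩ | ⟨k, hk, heq', hpk, hmax'⟩
      · have := hnone' tl (by omega)
        rw [← List.isPrefixOf_iff_prefix] at hhitl
        simp [hhitl] at this
      · have hkpre : p <+: s.drop k := (List.isPrefixOf_iff_prefix ..).1 hpk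
        have hklt : k < s.length := by
          by_contra hc
          exact pvNoHitPast s p hp (by omega) hkpre
        have h1 : ((k : Nat) : Int) ∈ a :: rest := (hmem _).2 ⟨k, hklt, rfl, hkpre⟩
        have h2 : ((k : Nat) : Int) ≤ (tl : Int) := hgleq ▸ hmax _ h1
        have h3 : ¬ k < tl := by
          intro hc
          have := hmax' tl hc (by omega)
          rw [← List.isPrefixOf_iff_prefix] at hhitl
          simp [hhitl] at this
        have : k = tl := by omega
        omega

-- per-symbol emission equality
theorem pvEmit (text pat name : String) (hp : pat.toList ≠ []) (L : List Int)
    (hpw : L.Pairwise (· < ·))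
    (hmem : ∀ i : Int, i ∈ L ↔ ∃ t : Nat, t < text.toList.length ∧ i = (t : Int)
            ∧ pat.toList <+: text.toList.drop t) :
    (if L ≠ [] then
       ([(PySem.List.pyGetD L 0 0, name), (PySem.List.pyGetD L (-1) 0, name)] : List (Int × String))
     else [])
    = [PySem.Str.find text pat, PySem.Str.rfind text pat].filterMap
        (fun x => if x > -1 then some (x, name) else none) := by
  rcases pvFR text pat hp L hpw hmem with ⟨rfl, hf, hr⟩ | ⟨jf, jl, hne, hhead, hlast, hf, hr⟩
  · rw [hf, hr]; simp
  · have h1 : ((jf : Int) > -1) := by omega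
    have h2 : ((jl : Int) > -1) := by omega
    have e1 : PySem.List.pyGetD L 0 0 = (jf : Int) := by
      rw [PySem.List.pyGetD_zero]; exact hhead
    have e2 : PySem.List.pyGetD L (-1) 0 = (jl : Int) := by
      rw [PySem.List.pyGetD_neg_one L 0 hne]; exact hlast
    rw [if_pos hne, e1, e2, hf, hr]
    simp [h1, h2]

-- B's conditional double-append loop is a flatMap of conditional fragments
theorem pvFoldl_emit {α : Type} (p : α → Prop) [DecidablePred p] (g : α → List (Int × String)) (l : List α) :
    l.foldl (fun acc x => if p x then acc ++ g x else acc) []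
    = l.flatMap (fun x => if p x then g x else []) := by
  have hstep : (fun (acc : List (Int × String)) x => if p x then acc ++ g x else acc)
      = fun acc x => acc ++ (if p x then g x else []) := by
    funext acc x
    by_cases hx : p x <;> simp [hx]
  rw [hstep, PySem.List.foldl_append_eq_flatMap]
  simp

-- the hit fragment contributed by position p
def pvFrag (text : String) (p : Int × Char) : List (String × Int) :=
  (if p.2 ∈ pvDigits then [(String.ofList [p.2], p.1)] else [])
  ++ (pvSpelled.filter (fun w => pvStartsAt text.toList w.toList p.1)).map (fun w => (w, p.1))

theorem pvHits_eq (text : String) :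
    pvHits text = (PySem.List.enumerate text.toList 0).flatMap (pvFrag text) := by
  unfold pvHits
  have hbody : (fun (acc : List (String × Int)) (p : Int × Char) =>
      pvSpelled.foldl
        (fun a w => if pvStartsAt text.toList w.toList p.1 then a ++ [(w, p.1)] else a)
        (if p.2 ∈ pvDigits then acc ++ [(String.ofList [p.2], p.1)] else acc))
      = fun acc p => acc ++ pvFrag text p := by
    funext acc p
    rw [PySem.List.foldl_append_if (fun w => pvStartsAt text.toList w.toList p.1)
      (fun w => (w, p.1)) pvSpelled]
    unfold pvFrag
    by_cases h : p.2 ∈ pvDigits <;> simp [h]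
  rw [hbody, PySem.List.foldl_append_eq_flatMap]
  simp

theorem pvOcc_getD (text : String) (sym : String) :
    (pvOcc text).getD sym [] = ((pvHits text).filter (fun p => p.1 == sym)).map (fun x => x.2) := by
  unfold pvOcc
  rw [PySem.Dict.getD_foldl_modify_append]
  simp

-- no spelled word is a one-character string
theorem pvSpelled_ne_single (w : String) (hw : w ∈ pvSpelled) (c : Char) :
    (w == String.ofList [c]) = false := by
  have hlen : w.toList.length ≠ 1 := by
    revert hw; revert w; decide
  apply beq_eq_false_iff_ne.2
  intro h
  apply hlen
  rw [h]
  simp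

theorem pvOfList_single_inj (c d : Char) (h : String.ofList [c] = String.ofList [d]) : c = d := by
  have := congrArg String.toList h
  simpa using this

-- in a Nodup list containing w, filtering "P x and x == w" keeps exactly w when P w
theorem pvFilter_and_beq {α : Type} [DecidableEq α] (l : List α) (hn : l.Nodup) (w : α)
    (hw : w ∈ l) (P : α → Bool) :
    l.filter (fun x => P x && (x == w)) = if P w then [w] else [] := by
  induction l with
  | nil => cases hw
  | cons a l ih =>
    rw [List.filter_cons]
    rcases List.mem_cons.1 hw with rfl | hw'
    · have hna : w ∉ l := (List.nodup_cons.1 hn).1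
      have htail : l.filter (fun x => P x && (x == w)) = [] := by
        apply List.filter_eq_nil_iff.2
        intro x hx
        have : x ≠ w := fun h => hna (h ▸ hx)
        simp [this]
      by_cases hP : P w = true <;> simp [hP, htail]
    · have hne : (a == w) = false := by
        have : a ≠ w := fun h => (List.nodup_cons.1 hn).1 (h ▸ hw')
        simp [this]
      rw [ih (List.nodup_cons.1 hn).2 hw']
      simp [hne]

-- the occurrence list of a digit symbol is the selection "character equals d"
theorem pvL_digit (text : String) (d : Char) (hd : d ∈ pvDigits) :
    (pvOcc text).getD (String.ofList [d]) []
    = pvSel (fun _ c => decide (c = d)) (PySem.List.enumerate text.toList 0) := by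
  rw [pvOcc_getD, pvHits_eq, List.filter_flatMap, List.map_flatMap]
  unfold pvSel
  apply List.flatMap_congr
  intro p _
  unfold pvFrag
  rw [List.filter_append, List.map_append]
  have hword : ((pvSpelled.filter (fun w => pvStartsAt text.toList w.toList p.1)).map
      (fun w => (w, p.1))).filter (fun q => q.1 == String.ofList [d]) = [] := by
    apply List.filter_eq_nil_iff.2
    intro q hq
    rcases List.mem_map.1 hq with ⟨w, hwmem, rfl⟩
    simpa using pvSpelled_ne_single w (List.mem_of_mem_filter hwmem) d
  rw [hword]
  by_cases hc : p.2 ∈ pvDigits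
  · by_cases he : p.2 = d
    · subst he; simp [hc]
    · have hb : (String.ofList [p.2] == String.ofList [d]) = false := by
        apply beq_eq_false_iff_ne.2
        intro h
        exact he (pvOfList_single_inj _ _ h)
      simp [hc, hb, he]
  · have he : p.2 ≠ d := fun h => hc (h ▸ hd)
    simp [hc, he]

-- the occurrence list of a spelled word is the selection "word starts here"
theorem pvL_word (text : String) (w : String) (hw : w ∈ pvSpelled) :
    (pvOcc text).getD w []
    = pvSel (fun i _ => pvStartsAt text.toList w.toList i) (PySem.List.enumerate text.toList 0) := by
  rw [pvOcc_getD, pvHits_eq, List.filter_flatMap, List.map_flatMap]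
  unfold pvSel
  apply List.flatMap_congr
  intro p _
  unfold pvFrag
  rw [List.filter_append, List.map_append]
  have hdig : ((if p.2 ∈ pvDigits then [(String.ofList [p.2], p.1)] else []).filter
      (fun q => q.1 == w)).map (fun x => x.2) = [] := by
    by_cases hc : p.2 ∈ pvDigits
    · have : (String.ofList [p.2] == w) = false := by
        have := pvSpelled_ne_single w hw p.2
        cases hbe : w == String.ofList [p.2]
        · apply beq_eq_false_iff_ne.2
          intro h
          exact (beq_eq_false_iff_ne.1 hbe) h.symm
        · rw [hbe] at this; cases this
      simp [hc, this]
    · simp [hc]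
  rw [hdig]
  have hfm : ((pvSpelled.filter (fun w' => pvStartsAt text.toList w'.toList p.1)).map
      (fun w' => (w', p.1))).filter (fun q => q.1 == w)
      = ((pvSpelled.filter (fun w' => pvStartsAt text.toList w'.toList p.1)).filter
          (fun w' => w' == w)).map (fun w' => (w', p.1)) := by
    rw [List.filter_map]
    rfl
  rw [hfm, List.filter_filter]
  have hnd : pvSpelled.Nodup := by decide
  rw [show (fun w' => (w' == w) && pvStartsAt text.toList w'.toList p.1)
      = (fun w' => pvStartsAt text.toList w'.toList p.1 && (w' == w)) from
      funext (fun w' => Bool.and_comm _ _)]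
  rw [pvFilter_and_beq pvSpelled hnd w hw (fun w' => pvStartsAt text.toList w'.toList p.1)]
  by_cases hs : pvStartsAt text.toList w.toList p.1 = true <;> simp [hs]

-- membership bridge for a digit: "character at t equals d" is "[d] is a prefix at t"
theorem pvMem_digit (text : String) (d : Char) (i : Int) :
    i ∈ pvSel (fun _ c => decide (c = d)) (PySem.List.enumerate text.toList 0)
    ↔ ∃ t : Nat, t < text.toList.length ∧ i = (t : Int)
        ∧ (String.ofList [d]).toList <+: text.toList.drop t := by
  rw [pvSel_mem]
  constructor
  · rintro ⟨t, ht, hi, hq⟩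
    refine ⟨t, ht, by simpa using hi, ?_⟩
    have he : text.toList[t] = d := by simpa using hq
    rw [← List.getElem_cons_drop ht, he]
    simp
  · rintro ⟨t, ht, hi, hpre⟩
    refine ⟨t, ht, by simpa using hi, ?_⟩
    have hpre' : [d] <+: text.toList.drop t := by simpa using hpre
    rw [← List.getElem_cons_drop ht] at hpre'
    simpa using ((List.cons_prefix_cons.1 hpre').1).symm

-- membership bridge for a spelled word
theorem pvMem_word (text : String) (w : String) (i : Int) :
    i ∈ pvSel (fun j _ => pvStartsAt text.toList w.toList j) (PySem.List.enumerate text.toList 0)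
    ↔ ∃ t : Nat, t < text.toList.length ∧ i = (t : Int) ∧ w.toList <+: text.toList.drop t := by
  rw [pvSel_mem]
  constructor
  · rintro ⟨t, ht, hi, hq⟩
    refine ⟨t, ht, by simpa using hi, ?_⟩
    unfold pvStartsAt at hq
    rw [← PySem.Chars.startswith_iff]
    simpa using hq
  · rintro ⟨t, ht, hi, hpre⟩
    refine ⟨t, ht, by simpa using hi, ?_⟩
    unfold pvStartsAt
    rw [PySem.Chars.startswith_iff]
    simpa using hpre

-- ===== VERDICT (by name: the statement is the Claim_ definition above) =====
theorem find_all_digits_spec : Claim_equal_find_all_digits := by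
  intro text _
  unfold Spec_find_all_digits
  have hB : find_all_digits_alt text =
    (pvDigits.foldl (fun acc d =>
       if (pvOcc text).getD (String.ofList [d]) [] ≠ [] then
         acc ++ [(PySem.List.pyGetD ((pvOcc text).getD (String.ofList [d]) []) 0 0, String.ofList [d]),
                 (PySem.List.pyGetD ((pvOcc text).getD (String.ofList [d]) []) (-1) 0, String.ofList [d])]
       else acc) [],
     (PySem.List.enumerate pvSpelled 0).foldl (fun acc p =>
       if (pvOcc text).getD p.2 [] ≠ [] then
         acc ++ [(PySem.List.pyGetD ((pvOcc text).getD p.2 []) 0 0, PySem.Int.toStr p.1),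
                 (PySem.List.pyGetD ((pvOcc text).getD p.2 []) (-1) 0, PySem.Int.toStr p.1)]
       else acc) []) := rfl
  rw [hB]
  unfold find_all_digits
  refine Prod.ext ?_ ?_
  · dsimp only
    rw [pvFoldl_emit (fun d => (pvOcc text).getD (String.ofList [d]) [] ≠ [])
      (fun d => [(PySem.List.pyGetD ((pvOcc text).getD (String.ofList [d]) []) 0 0, String.ofList [d]),
                 (PySem.List.pyGetD ((pvOcc text).getD (String.ofList [d]) []) (-1) 0, String.ofList [d])])]
    refine (List.flatMap_congr ?_).symm
    intro d hd
    rw [pvL_digit text d hd]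
    exact pvEmit text (String.ofList [d]) (String.ofList [d]) (by simp) _
      (pvSel_pairwise _ _ _) (pvMem_digit text d)
  · dsimp only
    rw [pvFoldl_emit (fun p : Int × String => (pvOcc text).getD p.2 [] ≠ [])
      (fun p : Int × String =>
        [(PySem.List.pyGetD ((pvOcc text).getD p.2 []) 0 0, PySem.Int.toStr p.1),
         (PySem.List.pyGetD ((pvOcc text).getD p.2 []) (-1) 0, PySem.Int.toStr p.1)])]
    refine (List.flatMap_congr ?_).symm
    intro p hp
    have hmem : p.2 ∈ pvSpelled := by
      rw [← PySem.List.map_snd_enumerate pvSpelled 0]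
      exact List.mem_map_of_mem hp
    have hne : p.2.toList ≠ [] := by
      have hall : ∀ w ∈ pvSpelled, w.toList ≠ [] := by decide
      exact hall _ hmem
    rw [pvL_word text p.2 hmem]
    exact pvEmit text p.2 (PySem.Int.toStr p.1) hne _
      (pvSel_pairwise _ _ _) (pvMem_word text p.2)
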